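-- pv_equiv track=rewrite | github.com/toroleapinc/encephagen | experiments/20_walker2d_calibration.py | classify_regions
-- ===== SOURCE A (Python) =====
-- def classify_regions(labels):
--     groups = {}
--     for key, patterns in [
--         ('somatosensory', ['S1', 'S2']),
--         ('visual', ['V1', 'V2', 'VAC']),
--         ('prefrontal', ['PFC', 'FEF']),
--         ('motor', ['M1', 'PMC']),
--         ('amygdala', ['AMYG']),
--         ('basal_ganglia', ['BG']),
--         ('thalamus', ['TM']),
--     ]:
--         groups[key] = [i for i, l in enumerate(labels)
--                        if any(p in l.upper() for p in patterns)]
--     return groups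
-- ===== SOURCE B (Python) =====
-- _PAT = {
--     'S1': 'somatosensory', 'S2': 'somatosensory',
--     'V1': 'visual', 'V2': 'visual', 'VAC': 'visual',
--     'PFC': 'prefrontal', 'FEF': 'prefrontal',
--     'M1': 'motor', 'PMC': 'motor',
--     'AMYG': 'amygdala',
--     'BG': 'basal_ganglia',
--     'TM': 'thalamus',
-- }
--
--
-- def classify_regions(labels):
--     groups = {'somatosensory': [], 'visual': [], 'prefrontal': [],
--               'motor': [], 'amygdala': [], 'basal_ganglia': [], 'thalamus': []}
--     for i, l in enumerate(labels):
--         u = l.upper()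
--         hit = set()
--         for j in range(len(u)):
--             for L in (2, 3, 4):
--                 k = _PAT.get(u[j:j+L])
--                 if k is not None:
--                     hit.add(k)
--         for k in groups:
--             if k in hit:
--                 groups[k].append(i)
--     return groups
-- ===== Notes on version B (the rewrite author's own statement) =====
-- stated objective: alternative
-- what changed: B inverts the matching: instead of A's seven per-region scans of labels, each testing every pattern with 'p in l.upper()', B builds one pattern->region dictionary and makes a single pass that enumerates each uppercased label's substrings of lengths 2/3/4 and looks them up, collecting the hit regions in a set before appending the index.
import Mathlib
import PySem

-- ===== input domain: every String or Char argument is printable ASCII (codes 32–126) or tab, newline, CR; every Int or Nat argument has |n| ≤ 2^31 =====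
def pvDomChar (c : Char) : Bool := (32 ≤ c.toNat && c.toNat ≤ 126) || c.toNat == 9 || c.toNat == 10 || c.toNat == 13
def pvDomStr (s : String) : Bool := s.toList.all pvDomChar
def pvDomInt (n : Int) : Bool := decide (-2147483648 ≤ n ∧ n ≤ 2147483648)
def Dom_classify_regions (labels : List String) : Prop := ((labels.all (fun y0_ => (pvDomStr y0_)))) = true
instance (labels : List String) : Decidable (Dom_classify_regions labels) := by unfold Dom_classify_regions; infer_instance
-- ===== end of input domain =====

-- B replaces A's per-region substring searches (seven scans of labels, each testing every
-- pattern with 'p in l.upper()') by a single pass that enumerates the substrings of each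
-- uppercased label of lengths 2/3/4 and looks them up in a pattern->region dictionary.

-- ===== PORT A =====
def pvRegions : List (String × List String) := [
  ("somatosensory", ["S1", "S2"]),
  ("visual", ["V1", "V2", "VAC"]),
  ("prefrontal", ["PFC", "FEF"]),
  ("motor", ["M1", "PMC"]),
  ("amygdala", ["AMYG"]),
  ("basal_ganglia", ["BG"]),
  ("thalamus", ["TM"])]

def classify_regions (labels : List String) : List (String × List Int) :=
  (pvRegions.foldl (fun g kp =>
      g.insert kp.1 (((PySem.List.enumerate labels 0).filter
        (fun il => kp.2.any (fun p => PySem.Str.isIn p (PySem.Str.upper il.2)))).map (·.1)))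
    PySem.Dict.empty).items

-- ===== PORT B =====
-- the module-level dict _PAT of Source B
def pvPat : PySem.Dict String String := PySem.Dict.mk [
  ("S1", "somatosensory"), ("S2", "somatosensory"),
  ("V1", "visual"), ("V2", "visual"), ("VAC", "visual"),
  ("PFC", "prefrontal"), ("FEF", "prefrontal"),
  ("M1", "motor"), ("PMC", "motor"),
  ("AMYG", "amygdala"),
  ("BG", "basal_ganglia"),
  ("TM", "thalamus")]

-- the two nested loops of Source B building 'hit' for one uppercased label u
-- ('k = _PAT.get(u[j:j+L]); if k is not None: hit.add(k)' is the Option.elim step)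
def pvHitSet (u : String) : PySem.Set String :=
  (PySem.List.pyRange 0 (PySem.Str.len u) 1).foldl (fun h j =>
    ([2, 3, 4] : List Int).foldl (fun h L =>
      (pvPat.get? (PySem.Str.slice u (some j) (some (j + L)))).elim h
        (fun k => PySem.Set.add h k)) h) PySem.Set.empty

def classify_regions_alt (labels : List String) : List (String × List Int) :=
  ((PySem.List.enumerate labels 0).foldl (fun g il =>
      let u := PySem.Str.upper il.2
      let hit := pvHitSet u
      g.keys.foldl (fun g' k =>
        if PySem.Set.contains hit k then g'.modify k [] (· ++ [il.1]) else g') g)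
    (PySem.Dict.mk [("somatosensory", []), ("visual", []), ("prefrontal", []),
      ("motor", []), ("amygdala", []), ("basal_ganglia", []), ("thalamus", [])])).items

-- ===== PRECONDITION & SPEC =====
def Spec_classify_regions (labels : List String) (out : List (String × List Int)) : Prop := out = classify_regions_alt labels
instance (labels : List String) (out : List (String × List Int)) : Decidable (Spec_classify_regions labels out) := by unfold Spec_classify_regions; infer_instance

-- ===== CLAIM (what is proved, stated in full; the proofs are below) =====
def Claim_equal_classify_regions : Prop := ∀ (labels : List String), Dom_classify_regions labels → Spec_classify_regions labels (classify_regions labels)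

-- ===== LEMMAS AND PROOFS =====

-- the seven-entry group dict as an explicit state
def pvD (a1 a2 a3 a4 a5 a6 a7 : List Int) : PySem.Dict String (List Int) :=
  PySem.Dict.mk [("somatosensory", a1), ("visual", a2), ("prefrontal", a3),
    ("motor", a4), ("amygdala", a5), ("basal_ganglia", a6), ("thalamus", a7)]

def pvHit (ps : List String) (l : String) : Bool :=
  ps.any (fun p => PySem.Str.isIn p (PySem.Str.upper l))

def pvG (ps : List String) (ls : List String) (s : Int) : List Int :=
  ((PySem.List.enumerate ls s).filter (fun il => pvHit ps il.2)).map (·.1)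

-- membership in a set grown by conditional adds from optional lookups
lemma pvMemFoldl {α : Type} (f : α → Option String) (xs : List α) (s : PySem.Set String) (k : String) :
    (k ∈ xs.foldl (fun h x => (f x).elim h (fun v => PySem.Set.add h v)) s) ↔
      k ∈ s ∨ ∃ x ∈ xs, f x = some k := by
  induction xs generalizing s with
  | nil => simp
  | cons x xs ih =>
    rw [List.foldl_cons, ih]
    cases hf : f x with
    | none =>
      simp only [Option.elim_none, List.mem_cons]
      constructor
      · rintro (hs | ⟨y, hy, hfy⟩)
        · exact Or.inl hs
        · exact Or.inr ⟨y, Or.inr hy, hfy⟩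
      · rintro (hs | ⟨y, (rfl | hy), hfy⟩)
        · exact Or.inl hs
        · rw [hf] at hfy; cases hfy
        · exact Or.inr ⟨y, hy, hfy⟩
    | some v =>
      simp only [Option.elim_some, PySem.Set.mem_add, List.mem_cons]
      constructor
      · rintro ((hs | rfl) | ⟨y, hy, hfy⟩)
        · exact Or.inl hs
        · exact Or.inr ⟨x, Or.inl rfl, hf⟩
        · exact Or.inr ⟨y, Or.inr hy, hfy⟩
      · rintro (hs | ⟨y, (rfl | hy), hfy⟩)
        · exact Or.inl (Or.inl hs)
        · rw [hf] at hfy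
          exact Or.inl (Or.inr (Option.some.inj hfy).symm)
        · exact Or.inr ⟨y, hy, hfy⟩

lemma pvMemHitSet (u : String) (k : String) :
    (k ∈ pvHitSet u) ↔ ∃ j ∈ PySem.List.pyRange 0 (PySem.Str.len u) 1,
      ∃ L ∈ ([2, 3, 4] : List Int),
        pvPat.get? (PySem.Str.slice u (some j) (some (j + L))) = some k := by
  have main : ∀ (js : List Int) (s : PySem.Set String),
      (k ∈ js.foldl (fun h j => ([2, 3, 4] : List Int).foldl (fun h L =>
          (pvPat.get? (PySem.Str.slice u (some j) (some (j + L)))).elim h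
            (fun v => PySem.Set.add h v)) h) s) ↔
        k ∈ s ∨ ∃ j ∈ js, ∃ L ∈ ([2, 3, 4] : List Int),
          pvPat.get? (PySem.Str.slice u (some j) (some (j + L))) = some k := by
    intro js
    induction js with
    | nil => intro s; simp
    | cons j js ih =>
      intro s
      rw [List.foldl_cons, ih,
        pvMemFoldl (fun L => pvPat.get? (PySem.Str.slice u (some j) (some (j + L)))) [2, 3, 4] s k]
      simp only [List.mem_cons]
      constructor
      · rintro ((hs | hex) | ⟨j', hj', rest⟩)
        · exact Or.inl hs
        · exact Or.inr ⟨j, Or.inl rfl, hex⟩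
        · exact Or.inr ⟨j', Or.inr hj', rest⟩
      · rintro (hs | ⟨j', (rfl | hj'), rest⟩)
        · exact Or.inl (Or.inl hs)
        · exact Or.inl (Or.inr rest)
        · exact Or.inr ⟨j', hj', rest⟩
  unfold pvHitSet
  rw [main _ PySem.Set.empty]
  simp [PySem.Set.empty]

-- slice of length |p| at a valid start equals p  ↔  p occurs in u (p nonempty)
lemma pvSliceIff (u p : String) (hp : p.toList ≠ []) :
    (∃ a : Nat, a < u.toList.length ∧ (u.toList.drop a).take p.toList.length = p.toList) ↔
      PySem.Str.isIn p u = true := by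
  have hIn : PySem.Str.isIn p u = PySem.Chars.isIn p.toList u.toList := by
    simp [pysem]
  rw [hIn, ← PySem.Chars.exists_prefix_drop_iff_isIn]
  constructor
  · rintro ⟨a, _, h⟩
    exact ⟨a, h ▸ List.take_prefix _ _⟩
  · rintro ⟨a, h⟩
    by_cases ha : a < u.toList.length
    · exact ⟨a, ha, (List.prefix_iff_eq_take.mp h).symm⟩
    · exfalso
      rw [List.drop_eq_nil_of_le (by omega)] at h
      exact hp (List.prefix_nil.mp h)


lemma pvSliceToList (u : String) (a L : Nat) :
    (PySem.Str.slice u (some (a : Int)) (some ((a : Int) + (L : Int)))).toList =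
      (u.toList.drop a).take L := by
  simp [pysem, PySem.List.slice_natCast_add]

lemma pvExistsIff (u : String) (ps : List String)
    (hl : ∀ p ∈ ps, p.toList.length = 2 ∨ p.toList.length = 3 ∨ p.toList.length = 4) :
    (∃ j ∈ PySem.List.pyRange 0 (PySem.Str.len u) 1, ∃ L ∈ ([2, 3, 4] : List Int),
        (PySem.Str.slice u (some j) (some (j + L))) ∈ ps) ↔
      ∃ p ∈ ps, PySem.Str.isIn p u = true := by
  constructor
  · rintro ⟨j, hj, L, hL, hmem⟩
    rw [PySem.List.mem_pyRange_one] at hj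
    have hjl : 0 ≤ j ∧ j < (u.toList.length : Int) := by simpa [pysem] using hj
    obtain ⟨a, rfl⟩ : ∃ a : Nat, j = (a : Int) := ⟨j.toNat, by omega⟩
    have ha : a < u.toList.length := by exact_mod_cast hjl.2
    refine ⟨_, hmem, ?_⟩
    obtain ⟨Ln, rfl, _⟩ : ∃ Ln : Nat, L = (Ln : Int) ∧ (Ln = 2 ∨ Ln = 3 ∨ Ln = 4) := by
      simp only [List.mem_cons] at hL
      rcases hL with rfl | rfl | rfl | h
      · exact ⟨2, by norm_num⟩
      · exact ⟨3, by norm_num⟩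
      · exact ⟨4, by norm_num⟩
      · exact absurd h (List.not_mem_nil)
    set p := PySem.Str.slice u (some (a : Int)) (some ((a : Int) + (Ln : Int))) with hpdef
    have hpt : p.toList = (u.toList.drop a).take Ln := pvSliceToList u a Ln
    have hlen : p.toList.length ≤ Ln := by rw [hpt]; simp
    have hne : p.toList ≠ [] := by
      intro hnil
      rcases hl p hmem with h | h | h <;> rw [hnil] at h <;> simp at h
    rw [← pvSliceIff u p hne]
    have h1 : (u.toList.drop a).take p.toList.length = p.toList := by
      by_cases hc : Ln ≤ (u.toList.drop a).length
      · have hplen : p.toList.length = Ln := by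
          rw [hpt, List.length_take]; omega
        rw [hplen, ← hpt]
      · have hdl : (u.toList.drop a).take Ln = u.toList.drop a := by
          exact List.take_of_length_le (by omega)
        have hplen : p.toList.length = (u.toList.drop a).length := by
          rw [hpt, hdl]
        rw [hplen, List.take_length, hpt, hdl]
    exact ⟨a, ha, h1⟩
  · rintro ⟨p, hp, hin⟩
    have hpne : p.toList ≠ [] := by
      intro hnil
      rcases hl p hp with h | h | h <;> rw [hnil] at h <;> simp at h
    obtain ⟨a, ha, htake⟩ := (pvSliceIff u p hpne).mpr hin
    refine ⟨(a : Int), ?_, ((p.toList.length : Nat) : Int), ?_, ?_⟩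
    · rw [PySem.List.mem_pyRange_one]
      refine ⟨by positivity, ?_⟩
      simp only [pysem, PySem.Str.len_eq]
      exact_mod_cast ha
    · rcases hl p hp with h | h | h <;> simp [h]
    · have heq : PySem.Str.slice u (some (a : Int)) (some ((a : Int) + (p.toList.length : Int))) = p :=
        String.toList_inj.mp (by rw [pvSliceToList u a p.toList.length, htake])
      rw [heq]
      exact hp

-- the twelve-entry lookup table, per region key
lemma pvPatK1 (q : String) : pvPat.get? q = some "somatosensory" ↔ q ∈ (["S1", "S2"] : List String) := by
  simp [pvPat, PySem.Dict.get?]; aesop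
lemma pvPatK2 (q : String) : pvPat.get? q = some "visual" ↔ q ∈ (["V1", "V2", "VAC"] : List String) := by
  simp [pvPat, PySem.Dict.get?]; aesop
lemma pvPatK3 (q : String) : pvPat.get? q = some "prefrontal" ↔ q ∈ (["PFC", "FEF"] : List String) := by
  simp [pvPat, PySem.Dict.get?]; aesop
lemma pvPatK4 (q : String) : pvPat.get? q = some "motor" ↔ q ∈ (["M1", "PMC"] : List String) := by
  simp [pvPat, PySem.Dict.get?]; aesop
lemma pvPatK5 (q : String) : pvPat.get? q = some "amygdala" ↔ q ∈ (["AMYG"] : List String) := by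
  simp [pvPat, PySem.Dict.get?]; aesop
lemma pvPatK6 (q : String) : pvPat.get? q = some "basal_ganglia" ↔ q ∈ (["BG"] : List String) := by
  simp [pvPat, PySem.Dict.get?]; aesop
lemma pvPatK7 (q : String) : pvPat.get? q = some "thalamus" ↔ q ∈ (["TM"] : List String) := by
  simp [pvPat, PySem.Dict.get?]; aesop

lemma pvContainsKey (u key : String) (ps : List String)
    (hq : ∀ q, pvPat.get? q = some key ↔ q ∈ ps)
    (hl : ∀ p ∈ ps, p.toList.length = 2 ∨ p.toList.length = 3 ∨ p.toList.length = 4) :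
    PySem.Set.contains (pvHitSet u) key = ps.any (fun p => PySem.Str.isIn p u) := by
  rw [Bool.eq_iff_iff, PySem.Set.contains_iff, pvMemHitSet, List.any_eq_true]
  simp only [hq]
  exact pvExistsIff u ps hl


lemma pvMod1 (c : Prop) [Decidable c] (i : Int) (a1 a2 a3 a4 a5 a6 a7 : List Int) :
    (if c then (pvD a1 a2 a3 a4 a5 a6 a7).modify "somatosensory" [] (· ++ [i]) else pvD a1 a2 a3 a4 a5 a6 a7) =
    pvD (a1 ++ if c then [i] else []) a2 a3 a4 a5 a6 a7 := by
  split_ifs with h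
  · rfl
  · simp

lemma pvMod2 (c : Prop) [Decidable c] (i : Int) (a1 a2 a3 a4 a5 a6 a7 : List Int) :
    (if c then (pvD a1 a2 a3 a4 a5 a6 a7).modify "visual" [] (· ++ [i]) else pvD a1 a2 a3 a4 a5 a6 a7) =
    pvD a1 (a2 ++ if c then [i] else []) a3 a4 a5 a6 a7 := by
  split_ifs with h
  · rfl
  · simp

lemma pvMod3 (c : Prop) [Decidable c] (i : Int) (a1 a2 a3 a4 a5 a6 a7 : List Int) :
    (if c then (pvD a1 a2 a3 a4 a5 a6 a7).modify "prefrontal" [] (· ++ [i]) else pvD a1 a2 a3 a4 a5 a6 a7) =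
    pvD a1 a2 (a3 ++ if c then [i] else []) a4 a5 a6 a7 := by
  split_ifs with h
  · rfl
  · simp

lemma pvMod4 (c : Prop) [Decidable c] (i : Int) (a1 a2 a3 a4 a5 a6 a7 : List Int) :
    (if c then (pvD a1 a2 a3 a4 a5 a6 a7).modify "motor" [] (· ++ [i]) else pvD a1 a2 a3 a4 a5 a6 a7) =
    pvD a1 a2 a3 (a4 ++ if c then [i] else []) a5 a6 a7 := by
  split_ifs with h
  · rfl
  · simp

lemma pvMod5 (c : Prop) [Decidable c] (i : Int) (a1 a2 a3 a4 a5 a6 a7 : List Int) :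
    (if c then (pvD a1 a2 a3 a4 a5 a6 a7).modify "amygdala" [] (· ++ [i]) else pvD a1 a2 a3 a4 a5 a6 a7) =
    pvD a1 a2 a3 a4 (a5 ++ if c then [i] else []) a6 a7 := by
  split_ifs with h
  · rfl
  · simp

lemma pvMod6 (c : Prop) [Decidable c] (i : Int) (a1 a2 a3 a4 a5 a6 a7 : List Int) :
    (if c then (pvD a1 a2 a3 a4 a5 a6 a7).modify "basal_ganglia" [] (· ++ [i]) else pvD a1 a2 a3 a4 a5 a6 a7) =
    pvD a1 a2 a3 a4 a5 (a6 ++ if c then [i] else []) a7 := by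
  split_ifs with h
  · rfl
  · simp

lemma pvMod7 (c : Prop) [Decidable c] (i : Int) (a1 a2 a3 a4 a5 a6 a7 : List Int) :
    (if c then (pvD a1 a2 a3 a4 a5 a6 a7).modify "thalamus" [] (· ++ [i]) else pvD a1 a2 a3 a4 a5 a6 a7) =
    pvD a1 a2 a3 a4 a5 a6 (a7 ++ if c then [i] else []) := by
  split_ifs with h
  · rfl
  · simp

lemma pvStepB (i : Int) (l : String) (a1 a2 a3 a4 a5 a6 a7 : List Int) :
    ((pvD a1 a2 a3 a4 a5 a6 a7).keys.foldl (fun g' k =>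
        if PySem.Set.contains (pvHitSet (PySem.Str.upper l)) k then g'.modify k [] (· ++ [i]) else g')
      (pvD a1 a2 a3 a4 a5 a6 a7)) =
    pvD (a1 ++ if pvHit ["S1", "S2"] l then [i] else [])
        (a2 ++ if pvHit ["V1", "V2", "VAC"] l then [i] else [])
        (a3 ++ if pvHit ["PFC", "FEF"] l then [i] else [])
        (a4 ++ if pvHit ["M1", "PMC"] l then [i] else [])
        (a5 ++ if pvHit ["AMYG"] l then [i] else [])
        (a6 ++ if pvHit ["BG"] l then [i] else [])
        (a7 ++ if pvHit ["TM"] l then [i] else []) := by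
  have h1 : PySem.Set.contains (pvHitSet (PySem.Str.upper l)) "somatosensory" = pvHit ["S1", "S2"] l :=
    pvContainsKey _ _ _ pvPatK1 (by intro p hp; fin_cases hp <;> decide)
  have h2 : PySem.Set.contains (pvHitSet (PySem.Str.upper l)) "visual" = pvHit ["V1", "V2", "VAC"] l :=
    pvContainsKey _ _ _ pvPatK2 (by intro p hp; fin_cases hp <;> decide)
  have h3 : PySem.Set.contains (pvHitSet (PySem.Str.upper l)) "prefrontal" = pvHit ["PFC", "FEF"] l :=
    pvContainsKey _ _ _ pvPatK3 (by intro p hp; fin_cases hp <;> decide)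
  have h4 : PySem.Set.contains (pvHitSet (PySem.Str.upper l)) "motor" = pvHit ["M1", "PMC"] l :=
    pvContainsKey _ _ _ pvPatK4 (by intro p hp; fin_cases hp <;> decide)
  have h5 : PySem.Set.contains (pvHitSet (PySem.Str.upper l)) "amygdala" = pvHit ["AMYG"] l :=
    pvContainsKey _ _ _ pvPatK5 (by intro p hp; fin_cases hp; decide)
  have h6 : PySem.Set.contains (pvHitSet (PySem.Str.upper l)) "basal_ganglia" = pvHit ["BG"] l :=
    pvContainsKey _ _ _ pvPatK6 (by intro p hp; fin_cases hp; decide)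
  have h7 : PySem.Set.contains (pvHitSet (PySem.Str.upper l)) "thalamus" = pvHit ["TM"] l :=
    pvContainsKey _ _ _ pvPatK7 (by intro p hp; fin_cases hp; decide)
  have hk : (pvD a1 a2 a3 a4 a5 a6 a7).keys =
      ["somatosensory", "visual", "prefrontal", "motor", "amygdala", "basal_ganglia", "thalamus"] := rfl
  rw [hk]
  simp only [List.foldl_cons, List.foldl_nil]
  rw [h1, h2, h3, h4, h5, h6, h7]
  rw [pvMod1, pvMod2, pvMod3, pvMod4, pvMod5, pvMod6, pvMod7]

lemma pvG_cons (ps : List String) (l : String) (ls : List String) (s : Int) :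
    pvG ps (l :: ls) s = (if pvHit ps l then [s] else []) ++ pvG ps ls (s + 1) := by
  simp only [pvG, PySem.List.enumerate_cons, List.filter_cons]
  split_ifs <;> simp

lemma pvLoop (ls : List String) (s : Int) (a1 a2 a3 a4 a5 a6 a7 : List Int) :
    ((PySem.List.enumerate ls s).foldl (fun g il =>
        let u := PySem.Str.upper il.2
        let hit := pvHitSet u
        g.keys.foldl (fun g' k =>
          if PySem.Set.contains hit k then g'.modify k [] (· ++ [il.1]) else g') g)
      (pvD a1 a2 a3 a4 a5 a6 a7)) =
    pvD (a1 ++ pvG ["S1", "S2"] ls s) (a2 ++ pvG ["V1", "V2", "VAC"] ls s)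
        (a3 ++ pvG ["PFC", "FEF"] ls s) (a4 ++ pvG ["M1", "PMC"] ls s)
        (a5 ++ pvG ["AMYG"] ls s) (a6 ++ pvG ["BG"] ls s) (a7 ++ pvG ["TM"] ls s) := by
  induction ls generalizing s a1 a2 a3 a4 a5 a6 a7 with
  | nil => simp [PySem.List.enumerate_nil, pvG]
  | cons l ls ih =>
    rw [PySem.List.enumerate_cons]
    simp only [List.foldl_cons]
    rw [pvStepB, ih]
    simp only [pvG_cons, List.append_assoc]

lemma pvAlt_eq (labels : List String) :
    classify_regions_alt labels = [
  ("somatosensory", pvG ["S1", "S2"] labels 0),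
  ("visual", pvG ["V1", "V2", "VAC"] labels 0),
  ("prefrontal", pvG ["PFC", "FEF"] labels 0),
  ("motor", pvG ["M1", "PMC"] labels 0),
  ("amygdala", pvG ["AMYG"] labels 0),
  ("basal_ganglia", pvG ["BG"] labels 0),
  ("thalamus", pvG ["TM"] labels 0)] := by
  unfold classify_regions_alt
  have hinit : PySem.Dict.mk [("somatosensory", ([] : List Int)), ("visual", []), ("prefrontal", []),
      ("motor", []), ("amygdala", []), ("basal_ganglia", []), ("thalamus", [])] =
      pvD [] [] [] [] [] [] [] := rfl
  rw [hinit, pvLoop]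
  simp [pvD]

lemma pvA_eq (labels : List String) :
    classify_regions labels = [
  ("somatosensory", pvG ["S1", "S2"] labels 0),
  ("visual", pvG ["V1", "V2", "VAC"] labels 0),
  ("prefrontal", pvG ["PFC", "FEF"] labels 0),
  ("motor", pvG ["M1", "PMC"] labels 0),
  ("amygdala", pvG ["AMYG"] labels 0),
  ("basal_ganglia", pvG ["BG"] labels 0),
  ("thalamus", pvG ["TM"] labels 0)] := by
  simp [classify_regions, pvRegions, PySem.Dict.insert, PySem.Dict.empty, PySem.Dict.contains,
    List.foldl, pvG, pvHit]

-- ===== VERDICT (by name: the statement is the Claim_ definition above) =====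
theorem classify_regions_spec : Claim_equal_classify_regions := by
  intro labels _
  unfold Spec_classify_regions
  rw [pvA_eq, pvAlt_eq]
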